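-- pv_equiv track=rewrite | github.com/1489ehdghks/python_algorithm | 프로그래머스/수 조작하기1.py | solution
-- ===== SOURCE A (Python) =====
-- def solution(n, control):
--     for i in control:
--         if i == 'w':
--             n = n+1
--         elif i == 's':
--             n = n-1
--         elif i == 'd':
--             n = n+10
--         elif i == 'a':
--             n = n-10
--         else:
--             pass
--
--     return n
-- ===== SOURCE B (Python) =====
-- def solution(n, control):
--     return (n + control.count('w') - control.count('s')
--               + 10 * control.count('d') - 10 * control.count('a'))
-- ===== Notes on version B (the rewrite author's own statement) =====
-- stated objective: simpler
-- what changed: Replaces the per-character four-way branching loop with a closed arithmetic formula over four character counts (str.count), with no explicit loop or branching.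
import Mathlib
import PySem

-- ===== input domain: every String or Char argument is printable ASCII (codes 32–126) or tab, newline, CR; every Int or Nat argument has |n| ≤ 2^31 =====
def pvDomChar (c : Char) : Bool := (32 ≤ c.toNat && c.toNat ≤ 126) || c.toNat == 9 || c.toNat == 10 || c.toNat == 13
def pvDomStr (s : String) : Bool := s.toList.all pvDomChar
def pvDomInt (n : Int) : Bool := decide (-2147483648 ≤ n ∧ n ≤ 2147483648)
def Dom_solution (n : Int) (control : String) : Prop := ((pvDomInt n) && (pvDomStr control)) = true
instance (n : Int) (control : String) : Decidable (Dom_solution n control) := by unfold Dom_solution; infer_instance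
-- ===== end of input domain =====

-- B replaces A's per-character branching loop by a closed formula over four character counts (objective: simpler).

-- ===== PORT A =====
def solution (n : Int) (control : String) : Int :=
  control.toList.foldl
    (fun n i =>
      if i = 'w' then n + 1
      else if i = 's' then n - 1
      else if i = 'd' then n + 10
      else if i = 'a' then n - 10
      else n) n

-- ===== PORT B =====
def solution_alt (n : Int) (control : String) : Int :=
  n + (PySem.Str.count control "w" : Int) - (PySem.Str.count control "s" : Int)
    + 10 * (PySem.Str.count control "d" : Int) - 10 * (PySem.Str.count control "a" : Int)

-- ===== PRECONDITION & SPEC =====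
def Spec_solution (n : Int) (control : String) (out : Int) : Prop := out = solution_alt n control
instance (n : Int) (control : String) (out : Int) : Decidable (Spec_solution n control out) := by unfold Spec_solution; infer_instance

-- ===== CLAIM (what is proved, stated in full; the proofs are below) =====
def Claim_equal_solution : Prop := ∀ (n : Int) (control : String), Dom_solution n control → Spec_solution n control (solution n control)

-- ===== LEMMAS AND PROOFS =====

-- Python s.count(c) for a single character c is the plain character count.
theorem count_go_singleton (c : Char) (l : List Char) (fuel acc : Nat)
    (h : l.length ≤ fuel) :
    PySem.Chars.count.go [c] fuel l acc = acc + l.count c := by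
  induction l generalizing fuel acc with
  | nil => cases fuel <;> simp [PySem.Chars.count.go]
  | cons x t ih =>
    cases fuel with
    | zero => simp at h
    | succ m =>
      simp only [List.length_cons, Nat.succ_le_succ_iff] at h
      simp only [PySem.Chars.count.go, List.isPrefixOf, List.count_cons]
      by_cases hx : c = x
      · subst hx
        simp [ih _ _ h]
        omega
      · have hbe : (c == x) = false := beq_false_of_ne hx
        have hbe2 : (x == c) = false := beq_false_of_ne (Ne.symm hx)
        simp [hbe, hbe2, ih _ _ h]

theorem count_singleton (s : List Char) (c : Char) :
    PySem.Chars.count s [c] = s.count c := by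
  simp [PySem.Chars.count, count_go_singleton c s s.length 0 le_rfl]

theorem foldl_wsda (l : List Char) (n : Int) :
    l.foldl
      (fun n i =>
        if i = 'w' then n + 1
        else if i = 's' then n - 1
        else if i = 'd' then n + 10
        else if i = 'a' then n - 10
        else n) n
    = n + (l.count 'w' : Int) - (l.count 's' : Int)
        + 10 * (l.count 'd' : Int) - 10 * (l.count 'a' : Int) := by
  induction l generalizing n with
  | nil => simp
  | cons x t ih =>
    simp only [List.foldl_cons, ih, List.count_cons]
    by_cases hw : x = 'w'
    · subst hw; simp; ring
    · by_cases hs : x = 's'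
      · subst hs; simp; ring
      · by_cases hd : x = 'd'
        · subst hd; simp; ring
        · by_cases ha : x = 'a'
          · subst ha; simp; ring
          · simp [hw, hs, hd, ha, beq_false_of_ne hw, beq_false_of_ne hs,
              beq_false_of_ne hd, beq_false_of_ne ha]

-- ===== VERDICT (by name: the statement is the Claim_ definition above) =====
theorem solution_spec : Claim_equal_solution := by
  intro n control _
  unfold Spec_solution solution solution_alt
  rw [foldl_wsda]
  simp only [PySem.Str.count_eq,
    show ("w" : String).toList = ['w'] from rfl,
    show ("s" : String).toList = ['s'] from rfl,
    show ("d" : String).toList = ['d'] from rfl,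
    show ("a" : String).toList = ['a'] from rfl,
    count_singleton]
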